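-- pv_equiv track=rewrite | github.com/UHH-ISS/unlinkable-data-sharing | implementation/generate_seed.py | create_seed
-- ===== SOURCE A (Python) =====
-- import copy
-- from collections import OrderedDict
--
-- class ValueOrderedDict(OrderedDict):
--     def sort_by_value(self):
--         sorted_items = sorted(super().items(), key=lambda item: item[1])
--         self.clear()
--         for key, value in sorted_items:
--             self[key] = value
--
--     def peekitem(self):
--         return next(iter(self.items()))
--
--     def peekitem_excluding(self, exclude_list=[]):
--         for key, value in self.items():
--             if key not in exclude_list:
--                 return key, value
--         return None
--
-- def create_seed(nbOfProviders, categories):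
--     frequencies = ValueOrderedDict({c: v for c,v in categories.items()})
--     org_freq = copy.copy(frequencies)
--     seed = [{} for _ in range(nbOfProviders)]
--
--     for i,s in enumerate(seed):
--         for c,v in frequencies.items():
--             if v > 0:
--                 seed[i][c] = 1
--                 frequencies[c] -= 1
--             else:
--                 seed[i][c] = 0
--
--     return seed
-- ===== SOURCE B (Python) =====
-- def create_seed(nbOfProviders, categories):
--     # Provider i gets a 1 for category c exactly when i < original frequency of c:
--     # stateless closed form, no mutable frequency dict threaded across providers.
--     return [{c: (1 if i < v else 0) for c, v in categories.items()}
--             for i in range(nbOfProviders)]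
-- ===== Notes on version B (the rewrite author's own statement) =====
-- stated objective: simpler
-- what changed: Replaced the stateful decrement-a-copied-frequency-dict sweep (and the unused ValueOrderedDict/org_freq machinery) by a stateless closed-form cell formula: provider i gets 1 for category c iff i < the original frequency of c.
import Mathlib
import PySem

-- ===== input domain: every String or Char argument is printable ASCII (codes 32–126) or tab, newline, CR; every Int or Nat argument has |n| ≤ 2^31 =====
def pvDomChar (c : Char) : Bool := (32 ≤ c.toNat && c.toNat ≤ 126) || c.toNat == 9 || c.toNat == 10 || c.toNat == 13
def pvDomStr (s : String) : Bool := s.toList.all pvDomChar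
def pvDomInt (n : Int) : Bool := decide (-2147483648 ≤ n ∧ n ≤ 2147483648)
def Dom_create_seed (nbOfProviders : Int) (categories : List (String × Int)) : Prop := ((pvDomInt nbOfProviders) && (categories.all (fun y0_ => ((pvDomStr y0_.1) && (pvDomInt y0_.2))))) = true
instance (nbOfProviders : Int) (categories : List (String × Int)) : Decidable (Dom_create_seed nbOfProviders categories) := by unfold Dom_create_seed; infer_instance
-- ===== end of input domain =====

-- B drops A's mutable frequency dict threaded across providers and computes each 0/1 cell
-- by the stateless closed form "1 iff provider index < original frequency" (objective: simpler).


-- ===== PORT A =====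
-- frequencies = ValueOrderedDict({c: v for c, v in categories.items()}); the org_freq copy is
-- unused and not ported.  The outer loop 'for i, s in enumerate(seed)' runs nbOfProviders times
-- and uses only the index count, ported as a fold over pyRange; each row dict seed[i] is built
-- by insertions; 'frequencies[c] -= 1' is get-then-set on the live dict (only values of
-- already-visited keys change, so iterating the items snapshot is exact).
def create_seed (nbOfProviders : Int) (categories : List (String × Int)) : List (List (String × Int)) :=
  let frequencies : PySem.Dict String Int := PySem.Dict.ofList categories
  let final :=
    (PySem.List.pyRange 0 nbOfProviders 1).foldl
      (fun (st : PySem.Dict String Int × List (List (String × Int))) _i =>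
        let inner :=
          st.1.items.foldl
            (fun (p : PySem.Dict String Int × PySem.Dict String Int) cv =>
              if cv.2 > 0 then
                (p.1.insert cv.1 1, p.2.insert cv.1 (p.2.getD cv.1 0 - 1))
              else
                (p.1.insert cv.1 0, p.2))
            (PySem.Dict.empty, st.1)
        (inner.2, st.2 ++ [inner.1.items]))
      (frequencies, [])
  final.2

-- ===== PORT B =====
-- return [{c: (1 if i < v else 0) for c, v in categories.items()} for i in range(nbOfProviders)]
def create_seed_alt (nbOfProviders : Int) (categories : List (String × Int)) : List (List (String × Int)) :=
  (PySem.List.pyRange 0 nbOfProviders 1).map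
    (fun i => categories.map (fun cv => (cv.1, if i < cv.2 then (1 : Int) else 0)))

-- ===== PRECONDITION & SPEC =====
-- categories is a Python dict, whose keys are necessarily distinct; an association list with a
-- duplicated key represents no dict input, so Pre_ excludes exactly those lists.
def Pre_create_seed (nbOfProviders : Int) (categories : List (String × Int)) : Prop :=
  (categories.map Prod.fst).Nodup
instance (nbOfProviders : Int) (categories : List (String × Int)) : Decidable (Pre_create_seed nbOfProviders categories) := by unfold Pre_create_seed; infer_instance

def pvWitness_create_seed : Int × (List (String × Int)) := (3, [("a", 2), ("b", 0), ("c", -1)])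

def Spec_create_seed (nbOfProviders : Int) (categories : List (String × Int)) (out : List (List (String × Int))) : Prop := out = create_seed_alt nbOfProviders categories
instance (nbOfProviders : Int) (categories : List (String × Int)) (out : List (List (String × Int))) : Decidable (Spec_create_seed nbOfProviders categories out) := by unfold Spec_create_seed; infer_instance

-- ===== CLAIM (what is proved, stated in full; the proofs are below) =====
def Claim_equal_create_seed : Prop := ∀ (nbOfProviders : Int) (categories : List (String × Int)), Dom_create_seed nbOfProviders categories → Pre_create_seed nbOfProviders categories → Spec_create_seed nbOfProviders categories (create_seed nbOfProviders categories)

-- ===== LEMMAS AND PROOFS =====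

-- the outer loop body of create_seed, named so lemmas can rewrite one application at a time
def pvStep (st : PySem.Dict String Int × List (List (String × Int))) (_i : Int) :
    PySem.Dict String Int × List (List (String × Int)) :=
  let inner :=
    st.1.items.foldl
      (fun (p : PySem.Dict String Int × PySem.Dict String Int) cv =>
        if cv.2 > 0 then
          (p.1.insert cv.1 1, p.2.insert cv.1 (p.2.getD cv.1 0 - 1))
        else
          (p.1.insert cv.1 0, p.2))
      (PySem.Dict.empty, st.1)
  (inner.2, st.2 ++ [inner.1.items])

theorem pv_create_seed_eq (n : Int) (cats : List (String × Int)) :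
    create_seed n cats = ((PySem.List.pyRange 0 n 1).foldl pvStep (PySem.Dict.ofList cats, [])).2 :=
  rfl

-- replacing the value of a key absent from Q is a no-op
theorem pv_map_noop (Q : List (String × Int)) (c : String) (w : Int)
    (h : c ∉ Q.map Prod.fst) :
    Q.map (fun p => if (p.1 == c) = true then (c, w) else p) = Q := by
  induction Q with
  | nil => rfl
  | cons q Q ih =>
    simp only [List.map_cons, List.mem_cons, not_or] at h ⊢
    rcases h with ⟨h1, h2⟩
    rw [if_neg (by simpa using fun e => h1 e.symm), ih h2]

-- the inner loop's pair state splits into two independent folds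
theorem pv_inner_split (L : List (String × Int)) (acc M : PySem.Dict String Int) :
    L.foldl
      (fun (p : PySem.Dict String Int × PySem.Dict String Int) cv =>
        if cv.2 > 0 then
          (p.1.insert cv.1 1, p.2.insert cv.1 (p.2.getD cv.1 0 - 1))
        else
          (p.1.insert cv.1 0, p.2))
      (acc, M)
    = (L.foldl (fun a cv => a.insert cv.1 (if cv.2 > 0 then 1 else 0)) acc,
       L.foldl (fun d cv => if cv.2 > 0 then d.insert cv.1 (d.getD cv.1 0 - 1) else d) M) := by
  induction L generalizing acc M with
  | nil => rfl
  | cons cv L ih =>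
    by_cases h : cv.2 > 0 <;> simp [h, ih]

-- the row dict collects fresh keys in order
theorem pv_row_items (L : List (String × Int)) (h : (L.map Prod.fst).Nodup) :
    (L.foldl (fun (a : PySem.Dict String Int) cv =>
        a.insert cv.1 (if cv.2 > 0 then 1 else 0)) PySem.Dict.empty).items
    = L.map (fun cv => (cv.1, if cv.2 > 0 then (1 : Int) else 0)) := by
  have := PySem.Dict.items_foldl_insert_fresh (l := L) (k := Prod.fst)
    (v := fun cv => (if cv.2 > 0 then (1 : Int) else 0)) (d := PySem.Dict.empty)
    (by intro a _; simp) h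
  simpa using this

-- one sweep of 'frequencies[c] -= 1 while v > 0' over a nodup-keyed dict, with processed prefix P
theorem pv_freq_fold (L : List (String × Int)) :
    ∀ (P : List (String × Int)), (((P ++ L).map Prod.fst)).Nodup →
    (L.foldl (fun (d : PySem.Dict String Int) cv =>
        if cv.2 > 0 then d.insert cv.1 (d.getD cv.1 0 - 1) else d)
      (PySem.Dict.mk (P ++ L))).items
    = P ++ L.map (fun cv => (cv.1, if cv.2 > 0 then cv.2 - 1 else cv.2)) := by
  induction L with
  | nil => intro P _; simp
  | cons cv L ih =>
    intro P hnd
    obtain ⟨c, v⟩ := cv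
    have hnd2 := hnd
    rw [List.map_append, List.map_cons] at hnd2
    have hPc : c ∉ P.map Prod.fst := fun hm =>
      (List.disjoint_of_nodup_append hnd2) hm (by simp)
    have hLc : c ∉ L.map Prod.fst :=
      (List.nodup_cons.mp (List.Nodup.of_append_right hnd2)).1
    by_cases hv : v > 0
    · have hmem : ((c, v) : String × Int) ∈ (PySem.Dict.mk (P ++ (c, v) :: L)).items := by
        simp
      have hkeys : (PySem.Dict.mk (P ++ (c, v) :: L)).keys.Nodup := by
        simpa [PySem.Dict.keys] using hnd
      have hgetD : (PySem.Dict.mk (P ++ (c, v) :: L)).getD c 0 = v :=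
        PySem.Dict.getD_of_mem_items _ hmem hkeys 0
      have hcont : (PySem.Dict.mk (P ++ (c, v) :: L)).contains c = true := by
        rw [PySem.Dict.contains_iff_mem_keys]
        simp [PySem.Dict.keys]
      have hins : (PySem.Dict.mk (P ++ (c, v) :: L)).insert c (v - 1)
          = PySem.Dict.mk ((P ++ [(c, v - 1)]) ++ L) := by
        apply PySem.Dict.ext
        rw [PySem.Dict.items_insert_of_contains _ _ hcont]
        show List.map _ (P ++ (c, v) :: L) = _
        rw [List.map_append, List.map_cons]
        rw [pv_map_noop P c (v - 1) hPc, pv_map_noop L c (v - 1) hLc]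
        simp
      have hnd' : (((P ++ [(c, v - 1)]) ++ L).map Prod.fst).Nodup := by
        simp only [List.map_append, List.map_cons] at hnd2 ⊢
        simpa [List.nodup_append, List.nodup_cons, or_comm] using hnd2
      calc _ = (L.foldl (fun (d : PySem.Dict String Int) cv =>
                if cv.2 > 0 then d.insert cv.1 (d.getD cv.1 0 - 1) else d)
              (PySem.Dict.mk ((P ++ [(c, v - 1)]) ++ L))).items := by
              simp only [List.foldl_cons, if_pos hv, hgetD, hins]
        _ = _ := by rw [ih _ hnd']; simp [hv]
    · have hnd' : (((P ++ [(c, v)]) ++ L).map Prod.fst).Nodup := by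
        simp only [List.map_append, List.map_cons] at hnd2 ⊢
        simpa [List.nodup_append, List.nodup_cons, or_comm] using hnd2
      calc _ = (L.foldl (fun (d : PySem.Dict String Int) cv =>
                if cv.2 > 0 then d.insert cv.1 (d.getD cv.1 0 - 1) else d)
              (PySem.Dict.mk ((P ++ [(c, v)]) ++ L))).items := by
              simp only [List.foldl_cons, if_neg hv]
              congr 1
              apply PySem.Dict.ext
              simp
        _ = _ := by rw [ih _ hnd']; simp [hv]

-- one round: on frequencies (v - min i v⁺) the loop emits B's row i and decrements to round i+1
theorem pvStep_eq (i j : Int) (cats : List (String × Int)) (acc : List (List (String × Int)))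
    (hi : 0 ≤ i) (hnd : (cats.map Prod.fst).Nodup) :
    pvStep (PySem.Dict.mk (cats.map (fun cv => (cv.1, cv.2 - min i (max cv.2 0)))), acc) j
    = (PySem.Dict.mk (cats.map (fun cv => (cv.1, cv.2 - min (i + 1) (max cv.2 0)))),
       acc ++ [cats.map (fun cv => (cv.1, if i < cv.2 then (1 : Int) else 0))]) := by
  set L := cats.map (fun cv => (cv.1, cv.2 - min i (max cv.2 0))) with hL
  have hLkeys : (L.map Prod.fst).Nodup := by
    simpa [hL, List.map_map, Function.comp] using hnd
  show (let inner := L.foldl _ (PySem.Dict.empty, PySem.Dict.mk L); (inner.2, acc ++ [inner.1.items])) = _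
  simp only [pv_inner_split]
  refine Prod.ext ?_ ?_
  · show (L.foldl (fun (d : PySem.Dict String Int) cv =>
        if cv.2 > 0 then d.insert cv.1 (d.getD cv.1 0 - 1) else d) (PySem.Dict.mk L)) = _
    apply PySem.Dict.ext
    have h0 := pv_freq_fold L [] (by simpa using hLkeys)
    simp only [List.nil_append] at h0
    show _ = (cats.map (fun cv => (cv.1, cv.2 - min (i + 1) (max cv.2 0))))
    rw [h0, hL, List.map_map]
    apply List.map_congr_left
    intro cv _
    simp only [Function.comp]
    by_cases h : cv.2 - min i (max cv.2 0) > 0 <;> simp only [if_pos, h, ite_false] <;> (congr 1; omega)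
  · show acc ++ [(L.foldl (fun (a : PySem.Dict String Int) cv =>
        a.insert cv.1 (if cv.2 > 0 then 1 else 0)) PySem.Dict.empty).items] = _
    rw [pv_row_items L hLkeys, hL, List.map_map]
    congr 2
    apply List.map_congr_left
    intro cv _
    simp only [Function.comp]
    by_cases h : i < cv.2
    · rw [if_pos (by omega), if_pos h]
    · rw [if_neg (by omega), if_neg h]

-- the outer loop, started at round i with k rounds to go
theorem pv_outer (k : Nat) :
    ∀ (i : Int) (cats : List (String × Int)) (acc : List (List (String × Int))),
    0 ≤ i → (cats.map Prod.fst).Nodup →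
    ((PySem.List.pyRange i (i + k) 1).foldl pvStep
      (PySem.Dict.mk (cats.map (fun cv => (cv.1, cv.2 - min i (max cv.2 0)))), acc)).2
    = acc ++ (PySem.List.pyRange i (i + k) 1).map
        (fun j => cats.map (fun cv => (cv.1, if j < cv.2 then (1 : Int) else 0))) := by
  induction k with
  | zero =>
    intro i cats acc _ _
    have h0 : i + ((0 : Nat) : Int) = i := by push_cast; omega
    rw [h0, PySem.List.pyRange_one_eq_nil le_rfl]
    simp
  | succ k ih =>
    intro i cats acc hi hnd
    have hlt : i < i + ((k : Nat) + 1 : Nat) := by push_cast; omega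
    rw [PySem.List.pyRange_one_cons hlt, List.foldl_cons, List.map_cons,
      pvStep_eq i i cats acc hi hnd]
    have hsh : i + ((k : Nat) + 1 : Nat) = (i + 1) + (k : Nat) := by push_cast; omega
    rw [hsh, ih (i + 1) cats _ (by omega) hnd]
    simp

theorem pv_ofList_items (cats : List (String × Int)) (hnd : (cats.map Prod.fst).Nodup) :
    (PySem.Dict.ofList cats).items = cats := by
  have := PySem.Dict.items_foldl_insert_fresh (l := cats) (k := Prod.fst) (v := Prod.snd)
    (d := PySem.Dict.empty) (by intro a _; simp) hnd
  simpa [PySem.Dict.ofList, PySem.Dict.update] using this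

-- ===== VERDICT (by name: the statement is the Claim_ definition above) =====
theorem create_seed_spec : Claim_equal_create_seed := by
  intro n cats _ hnd
  unfold Spec_create_seed create_seed_alt
  rw [pv_create_seed_eq]
  by_cases hn : n ≤ 0
  · rw [PySem.List.pyRange_one_eq_nil hn]
    rfl
  · have h0 : PySem.Dict.ofList cats
        = PySem.Dict.mk (cats.map (fun cv => (cv.1, cv.2 - min 0 (max cv.2 0)))) := by
      apply PySem.Dict.ext
      rw [pv_ofList_items cats hnd]
      show cats = _
      symm
      calc _ = cats.map id := by
              apply List.map_congr_left
              intro cv _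
              simp only [id]
              have h1 : min 0 (max cv.2 0) = 0 := by omega
              rw [h1]
              simp
        _ = cats := List.map_id cats
    rw [h0]
    have hk := pv_outer n.toNat 0 cats [] le_rfl hnd
    rw [show (0 : Int) + (n.toNat : Nat) = n by omega] at hk
    simpa using hk
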